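-- pv_equiv track=rewrite | github.com/YiyongZhao/PhyloTracer | phylotracer/Hybrid_Visualizer.py | get_hybrid_dic
-- ===== SOURCE A (Python) =====
-- def get_hybrid_dic(summary_dic):
--     """
--     Group triplet keys by hybrid species.
--
--     Parameters
--     ----------
--     summary_dic : dict
--         Mapping from triplet keys to lists of entries.
--
--     Returns
--     -------
--     dict
--         Mapping from hybrid taxa to triplet key lists.
--
--     Assumptions
--     -----------
--     Triplet keys are formatted as P1-Hybrid-P2.
--     """
--     hybrid_dic = {}
--     for k, v in summary_dic.items():
--         hybrid_tup = k.split("-")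
--         if hybrid_tup[1] in hybrid_dic:
--             hybrid_dic[hybrid_tup[1]].append(k)
--         else:
--             hybrid_dic[hybrid_tup[1]] = [k]
--     return hybrid_dic
-- ===== SOURCE B (Python) =====
-- def get_hybrid_dic(summary_dic):
--     # Two-pass decomposition: dedup the middle tokens once, then gather each group.
--     mids = [k.split("-")[1] for k in summary_dic]
--     order = list(dict.fromkeys(mids))
--     return {m: [k for k, mk in zip(summary_dic, mids) if mk == m] for m in order}
-- ===== Notes on version B (the rewrite author's own statement) =====
-- stated objective: alternative
-- what changed: Replaces the incremental dict-with-append grouping loop by a two-pass scheme: one comprehension computes all middle tokens, an ordered dedup fixes the group order, and each group's key list is rebuilt by a filtering comprehension.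
import Mathlib
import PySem

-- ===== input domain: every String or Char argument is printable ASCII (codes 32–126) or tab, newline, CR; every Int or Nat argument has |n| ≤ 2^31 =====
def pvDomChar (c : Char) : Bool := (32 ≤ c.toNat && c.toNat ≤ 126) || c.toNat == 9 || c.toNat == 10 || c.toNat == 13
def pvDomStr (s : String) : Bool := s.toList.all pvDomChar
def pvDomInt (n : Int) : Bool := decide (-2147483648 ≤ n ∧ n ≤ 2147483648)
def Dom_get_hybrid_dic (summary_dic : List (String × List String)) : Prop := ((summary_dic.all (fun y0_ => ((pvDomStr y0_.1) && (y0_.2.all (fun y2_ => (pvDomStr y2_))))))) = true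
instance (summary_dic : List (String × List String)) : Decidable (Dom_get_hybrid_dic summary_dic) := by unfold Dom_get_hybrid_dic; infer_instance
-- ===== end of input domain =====

-- B groups the keys in two passes (compute all middle tokens, ordered-dedup them, then rebuild
-- each group by a filtering scan) instead of A's single incremental dict-with-append loop;
-- objective: alternative decomposition, same result.

-- ===== PORT A =====
-- hybrid_dic[hybrid_tup[1]].append(k) / hybrid_dic[hybrid_tup[1]] = [k]; the index hybrid_tup[1]
-- is total here via getD "" — Pre_ guarantees the index exists (IndexError excluded by Pre_).
def get_hybrid_dic (summary_dic : List (String × List String)) : List (String × List String) :=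
  (summary_dic.foldl
    (fun hybrid_dic kv =>
      let hybrid_tup := (PySem.Str.split? kv.1 "-").getD []
      let m := (PySem.List.pyGet? hybrid_tup 1).getD ""
      if hybrid_dic.contains m then
        hybrid_dic.modify m [] (· ++ [kv.1])
      else
        hybrid_dic.insert m [kv.1])
    PySem.Dict.empty).items

-- ===== PORT B =====
def get_hybrid_dic_alt (summary_dic : List (String × List String)) : List (String × List String) :=
  let keys := summary_dic.map (·.1)
  let mids := keys.map (fun k => (PySem.List.pyGet? ((PySem.Str.split? k "-").getD []) 1).getD "")
  let order := PySem.List.dedup mids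
  order.map (fun m => (m, ((keys.zip mids).filter (fun p => p.2 == m)).map (·.1)))

-- ===== PRECONDITION & SPEC =====
-- Pre_ excludes exactly the inputs where some key has no "-" (split yields a single token), on
-- which the Python A raises IndexError at hybrid_tup[1] (B raises there too).
def Pre_get_hybrid_dic (summary_dic : List (String × List String)) : Prop :=
  ∀ kv ∈ summary_dic, 2 ≤ ((PySem.Str.split? kv.1 "-").getD []).length
instance (summary_dic : List (String × List String)) : Decidable (Pre_get_hybrid_dic summary_dic) := by unfold Pre_get_hybrid_dic; infer_instance
def pvWitness_get_hybrid_dic : (List (String × List String)) := [("a-b-c", ["x"]), ("d-b-e", [])]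

def Spec_get_hybrid_dic (summary_dic : List (String × List String)) (out : List (String × List String)) : Prop := out = get_hybrid_dic_alt summary_dic
instance (summary_dic : List (String × List String)) (out : List (String × List String)) : Decidable (Spec_get_hybrid_dic summary_dic out) := by unfold Spec_get_hybrid_dic; infer_instance

-- ===== CLAIM (what is proved, stated in full; the proofs are below) =====
def Claim_equal_get_hybrid_dic : Prop := ∀ (summary_dic : List (String × List String)), Dom_get_hybrid_dic summary_dic → Pre_get_hybrid_dic summary_dic → Spec_get_hybrid_dic summary_dic (get_hybrid_dic summary_dic)

-- ===== LEMMAS AND PROOFS =====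

-- the middle token of a key, as both ports compute it
def pvMid (k : String) : String := (PySem.List.pyGet? ((PySem.Str.split? k "-").getD []) 1).getD ""

-- the branch of A's loop body is exactly a modify-with-default
theorem pv_step_eq (d : PySem.Dict String (List String)) (m k : String) :
    (if d.contains m then d.modify m [] (· ++ [k]) else d.insert m [k])
      = d.modify m [] (· ++ [k]) := by
  split_ifs with h
  · rfl
  · have hc : d.contains m = false := by simpa using h
    rw [PySem.Dict.modify, PySem.Dict.getD_of_not_contains]
    · rfl
    · exact hc

-- A's fold is the grouping fold over (mid, key) pairs
theorem pv_fold_eq (summary_dic : List (String × List String)) :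
    summary_dic.foldl
      (fun hybrid_dic kv =>
        let hybrid_tup := (PySem.Str.split? kv.1 "-").getD []
        let m := (PySem.List.pyGet? hybrid_tup 1).getD ""
        if hybrid_dic.contains m then
          hybrid_dic.modify m [] (· ++ [kv.1])
        else
          hybrid_dic.insert m [kv.1])
      PySem.Dict.empty
    = (summary_dic.map (fun kv => (pvMid kv.1, kv.1))).foldl
        (fun d p => d.modify p.1 [] (· ++ [p.2])) PySem.Dict.empty := by
  rw [List.foldl_map]
  congr 1
  funext d kv
  simpa [pvMid] using pv_step_eq d (pvMid kv.1) kv.1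

-- the zip-filter-map in B equals the pair-filter-map used to characterise A
theorem pv_zip_filter (ks : List String) (m : String) :
    (((ks.zip (ks.map pvMid)).filter (fun p => p.2 == m)).map (·.1))
      = (((ks.map (fun k => (pvMid k, k))).filter (fun p => p.1 == m)).map (·.2)) := by
  induction ks with
  | nil => rfl
  | cons a t ih =>
    by_cases h : pvMid a = m <;> simp [h, ih]

theorem get_hybrid_dic_eq_alt (summary_dic : List (String × List String)) :
    get_hybrid_dic summary_dic = get_hybrid_dic_alt summary_dic := by
  unfold get_hybrid_dic get_hybrid_dic_alt
  rw [pv_fold_eq]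
  have hl : summary_dic.map (fun kv => (pvMid kv.1, kv.1))
      = (summary_dic.map (·.1)).map (fun k => (pvMid k, k)) := by
    simp [List.map_map, Function.comp]
  rw [hl]
  set ks := summary_dic.map (·.1) with hks
  set l := ks.map (fun k => (pvMid k, k)) with hldef
  set D := l.foldl (fun d p => d.modify p.1 [] (· ++ [p.2])) PySem.Dict.empty with hD
  have hnd : D.keys.Nodup := by
    rw [hD]
    exact PySem.Dict.nodup_keys_foldl_modify_key l (·.1) [] (fun d p => (· ++ [p.2])) _
      (by simp [PySem.Dict.keys_empty])
  have hkeys : D.keys = PySem.List.dedup (ks.map pvMid) := by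
    rw [hD, PySem.Dict.keys_foldl_modify_key]
    simp [PySem.Dict.keys_empty, PySem.Set.update_nil_left, hldef, List.map_map, Function.comp_def]
  have hitems : D.items = D.keys.map (fun k => (k, D.getD k [])) :=
    PySem.Dict.items_eq_map_keys D hnd []
  rw [hitems, hkeys]
  show _ = (PySem.List.dedup (ks.map pvMid)).map
      (fun m => (m, ((ks.zip (ks.map pvMid)).filter (fun p => p.2 == m)).map (·.1)))
  apply List.map_congr_left
  intro m _
  have hgd : D.getD m [] = (l.filter (fun p => p.1 == m)).map (·.2) := by
    rw [hD, PySem.Dict.getD_foldl_modify_append]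
    simp [PySem.Dict.getD_empty]
  rw [hgd, hldef]
  exact congrArg (Prod.mk m) (pv_zip_filter ks m).symm

-- ===== VERDICT (by name: the statement is the Claim_ definition above) =====
theorem get_hybrid_dic_spec : Claim_equal_get_hybrid_dic := by
  intro summary_dic _ _
  unfold Spec_get_hybrid_dic
  exact get_hybrid_dic_eq_alt summary_dic
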